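-- pv_equiv track=rewrite | github.com/TimBluesWin/travelling-salesman-project | tsp-backend/api/services/christofidesAlgorithm.py | convertMatrix
-- ===== SOURCE A (Python) =====
-- import copy, random
--
-- def convertMatrix(matrix):
--     resultMatrix = copy.deepcopy(matrix)
--     currentStartIndex = 0
--     for startCity in matrix:
--         currentEndIndex = 0
--         for endCity in startCity:
--             if currentStartIndex >= currentEndIndex:
--                 resultMatrix[currentStartIndex][currentEndIndex] = 0
--             currentEndIndex = currentEndIndex + 1
--         currentStartIndex = currentStartIndex + 1
--     return resultMatrix
-- ===== SOURCE B (Python) =====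
-- def convertMatrix(matrix):
--     return [[0] * min(i + 1, len(row)) + row[i + 1:] for i, row in enumerate(matrix)]
-- ===== Notes on version B (the rewrite author's own statement) =====
-- stated objective: simpler
-- what changed: Builds each output row at once as a zero prefix of length min(i+1, len(row)) concatenated with the slice row[i+1:], replacing the deepcopy plus nested per-element index-comparison loop that mutates the copy in place.
import Mathlib
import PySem

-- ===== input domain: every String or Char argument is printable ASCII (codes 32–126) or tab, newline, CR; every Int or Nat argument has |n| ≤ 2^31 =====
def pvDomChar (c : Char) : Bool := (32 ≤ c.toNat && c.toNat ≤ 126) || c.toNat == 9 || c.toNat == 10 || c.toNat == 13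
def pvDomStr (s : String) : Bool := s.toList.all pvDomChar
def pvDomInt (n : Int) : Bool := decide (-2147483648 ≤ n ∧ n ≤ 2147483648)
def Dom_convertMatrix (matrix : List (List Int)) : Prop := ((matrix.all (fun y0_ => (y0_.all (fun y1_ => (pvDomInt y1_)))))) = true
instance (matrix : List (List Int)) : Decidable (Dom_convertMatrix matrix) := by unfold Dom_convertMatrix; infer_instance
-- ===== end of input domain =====

-- B builds each output row at once as a zero prefix plus a slice, instead of A's
-- deepcopy mutated by a nested per-element index-comparison loop (objective: simpler).

-- ===== PORT A =====
-- literal transliteration of A: deepcopy, then nested loops over the rows/elements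
-- with Nat counters, assigning resultMatrix[i][j] := 0 whenever i ≥ j.
def convertMatrix (matrix : List (List Int)) : List (List Int) :=
  let resultMatrix := matrix
  let r := matrix.foldl
    (fun (st : List (List Int) × Nat) startCity =>
      let inner := startCity.foldl
        (fun (st2 : List (List Int) × Nat) _endCity =>
          ((if st2.2 ≤ st.2 then
              st2.1.set st.2 ((st2.1.getD st.2 []).set st2.2 0)
            else st2.1), st2.2 + 1))
        (st.1, 0)
      (inner.1, st.2 + 1))
    (resultMatrix, 0)
  r.1

-- ===== PORT B =====
-- helper = the enumerate-comprehension of Source B, carrying the running index i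
def convertMatrixAltGo (i : Nat) : List (List Int) → List (List Int)
  | [] => []
  | row :: rest =>
      (List.replicate (min (i + 1) row.length) 0 ++ row.drop (i + 1)) :: convertMatrixAltGo (i + 1) rest

def convertMatrix_alt (matrix : List (List Int)) : List (List Int) :=
  convertMatrixAltGo 0 matrix

-- ===== PRECONDITION & SPEC =====
def Spec_convertMatrix (matrix : List (List Int)) (out : List (List Int)) : Prop := out = convertMatrix_alt matrix
instance (matrix : List (List Int)) (out : List (List Int)) : Decidable (Spec_convertMatrix matrix out) := by unfold Spec_convertMatrix; infer_instance

-- ===== CLAIM (what is proved, stated in full; the proofs are below) =====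
def Claim_equal_convertMatrix : Prop := ∀ (matrix : List (List Int)), Dom_convertMatrix matrix → Spec_convertMatrix matrix (convertMatrix matrix)

-- ===== LEMMAS AND PROOFS =====

-- what A's inner loop does to the current row, as a standalone recursion
def zapP (cur : List Int) (j i : Nat) : List Int → List Int
  | [] => cur
  | _ :: t => zapP (if j ≤ i then cur.set j 0 else cur) (j + 1) i t

theorem getD_mid (done : List (List Int)) (cur : List Int) (rest : List (List Int)) :
    (done ++ cur :: rest).getD done.length [] = cur := by
  induction done with
  | nil => rfl
  | cons d ds ih => simp

theorem set_mid (done : List (List Int)) (cur x : List Int) (rest : List (List Int)) :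
    (done ++ cur :: rest).set done.length x = done ++ x :: rest := by
  induction done with
  | nil => rfl
  | cons d ds ih => simp [ih]

theorem inner_eq (i : Nat) (row : List Int) :
    ∀ (done : List (List Int)) (cur : List Int) (rest : List (List Int)) (j : Nat),
    done.length = i →
    row.foldl
      (fun (st2 : List (List Int) × Nat) _endCity =>
        ((if st2.2 ≤ i then
            st2.1.set i ((st2.1.getD i []).set st2.2 0)
          else st2.1), st2.2 + 1))
      (done ++ cur :: rest, j)
    = (done ++ zapP cur j i row :: rest, j + row.length) := by
  induction row with
  | nil => intro done cur rest j h; simp [zapP]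
  | cons a t ih =>
      intro done cur rest j h
      subst h
      simp only [List.foldl_cons, zapP]
      by_cases hj : j ≤ done.length
      · rw [if_pos hj, if_pos hj, getD_mid, set_mid]
        rw [ih done _ rest (j + 1) rfl]
        simp [Nat.add_comm, Nat.add_left_comm]
      · rw [if_neg hj, if_neg hj, ih done _ rest (j + 1) rfl]
        simp [Nat.add_comm, Nat.add_left_comm]

theorem zapP_get? (row : List Int) : ∀ (cur : List Int) (j i p : Nat),
    (zapP cur j i row)[p]? =
      if j ≤ p ∧ p < j + row.length ∧ p ≤ i ∧ p < cur.length then some 0 else cur[p]? := by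
  induction row with
  | nil =>
      intro cur j i p
      have h : ¬(j ≤ p ∧ p < j + ([] : List Int).length ∧ p ≤ i ∧ p < cur.length) := by
        simp only [List.length_nil]; omega
      rw [zapP, if_neg h]
  | cons a t ih =>
      intro cur j i p
      rw [zapP, ih]
      simp only [List.length_cons]
      by_cases hji : j ≤ i
      · rw [if_pos hji]
        simp only [List.length_set, List.getElem?_set]
        by_cases h1 : j + 1 ≤ p ∧ p < j + 1 + t.length ∧ p ≤ i ∧ p < cur.length
        · rw [if_pos h1, if_pos (by omega)]
        · rw [if_neg h1]
          by_cases hpj : j = p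
          · subst hpj
            by_cases hp : j < cur.length
            · rw [if_pos rfl, if_pos hp, if_pos (by omega)]
            · rw [if_pos rfl, if_neg hp, if_neg (by omega),
                  List.getElem?_eq_none_iff.2 (by omega)]
          · rw [if_neg hpj, if_neg (by omega)]
      · rw [if_neg hji]
        by_cases h1 : j + 1 ≤ p ∧ p < j + 1 + t.length ∧ p ≤ i ∧ p < cur.length
        · rw [if_pos h1, if_pos (by omega)]
        · rw [if_neg h1, if_neg (by omega)]

theorem zapP_row (row : List Int) (i : Nat) :
    zapP row 0 i row = List.replicate (min (i + 1) row.length) 0 ++ row.drop (i + 1) := by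
  apply List.ext_getElem?
  intro p
  rw [zapP_get? row row 0 i p, List.getElem?_append, List.length_replicate]
  by_cases hp : p < min (i + 1) row.length
  · rw [if_pos (by omega), if_pos hp, List.getElem?_replicate, if_pos hp]
  · rw [if_neg (by omega), if_neg hp, List.getElem?_drop]
    by_cases hl : p < row.length
    · congr 1; omega
    · rw [List.getElem?_eq_none_iff.2 (by omega), List.getElem?_eq_none_iff.2 (by omega)]

theorem outer_eq : ∀ (rest done : List (List Int)),
    (rest.foldl
      (fun (st : List (List Int) × Nat) startCity =>
        let inner := startCity.foldl
          (fun (st2 : List (List Int) × Nat) _endCity =>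
            ((if st2.2 ≤ st.2 then
                st2.1.set st.2 ((st2.1.getD st.2 []).set st2.2 0)
              else st2.1), st2.2 + 1))
          (st.1, 0)
        (inner.1, st.2 + 1))
      (done ++ rest, done.length)).1
    = done ++ convertMatrixAltGo done.length rest := by
  intro rest
  induction rest with
  | nil => intro done; simp [convertMatrixAltGo]
  | cons row rest' ih =>
      intro done
      simp only [List.foldl_cons]
      rw [inner_eq done.length row done row rest' 0 rfl]
      have h1 : done ++ zapP row 0 done.length row :: rest'
          = (done ++ [zapP row 0 done.length row]) ++ rest' := by simp
      have h2 : done.length + 1 = (done ++ [zapP row 0 done.length row]).length := by simp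
      rw [h1, h2, ih (done ++ [zapP row 0 done.length row])]
      simp [convertMatrixAltGo, zapP_row]

-- ===== VERDICT (by name: the statement is the Claim_ definition above) =====
theorem convertMatrix_spec : Claim_equal_convertMatrix := by
  intro matrix _
  show convertMatrix matrix = convertMatrix_alt matrix
  have := outer_eq matrix []
  simpa [convertMatrix, convertMatrix_alt] using this
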